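-- pv_equiv track=rewrite | github.com/KimHuu2486/LAB_THTH | LAST_TERM/TNT/Ex3.py | build_residual
-- ===== SOURCE A (Python) =====
-- def build_residual(adj):
--     residual = {}
--     for u in adj:
--         if u not in residual:
--             residual[u] = {}
--         for v, c in adj[u].items():
--             if v not in residual:
--                 residual[v] = {}
--             residual[u][v] = residual[u].get(v, 0) + c
--
--             residual[v].setdefault(u, residual[v].get(u, 0))
--     return residual
-- ===== SOURCE B (Python) =====
-- def _row(edges, x):
--     # Build vertex x's residual row by replaying the edges that touch x, in order.
--     row = {}
--     for u, v, c in edges: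
--         if u == x:
--             row[v] = row.get(v, 0) + c
--         if v == x and u not in row:
--             row[u] = 0
--     return row
--
--
-- def build_residual(adj):
--     edges = [(u, v, c) for u, nbrs in adj.items() for v, c in nbrs.items()]
--     stream = [x for u, nbrs in adj.items() for x in (u, *nbrs.keys())]
--     order = list(dict.fromkeys(stream))
--     touching = {x: [] for x in order}
--     for e in edges:
--         u, v, c = e
--         touching[u].append(e)
--         if v != u:
--             touching[v].append(e)
--     return {x: _row(touching[x], x) for x in order}
-- ===== Notes on version B (the rewrite author's own statement) =====
-- stated objective: alternative
-- what changed: A builds the residual graph in one interleaved pass that mutates a nested dict per edge (creating rows, adding forward capacities and reverse zero-defaults as it goes); B works in separate passes: it flattens adj into an edge list and a deduplicated vertex stream, groups the edges touching each vertex into per-vertex buckets, and then computes each vertex's row independently by replaying its own bucket.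
import Mathlib
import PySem

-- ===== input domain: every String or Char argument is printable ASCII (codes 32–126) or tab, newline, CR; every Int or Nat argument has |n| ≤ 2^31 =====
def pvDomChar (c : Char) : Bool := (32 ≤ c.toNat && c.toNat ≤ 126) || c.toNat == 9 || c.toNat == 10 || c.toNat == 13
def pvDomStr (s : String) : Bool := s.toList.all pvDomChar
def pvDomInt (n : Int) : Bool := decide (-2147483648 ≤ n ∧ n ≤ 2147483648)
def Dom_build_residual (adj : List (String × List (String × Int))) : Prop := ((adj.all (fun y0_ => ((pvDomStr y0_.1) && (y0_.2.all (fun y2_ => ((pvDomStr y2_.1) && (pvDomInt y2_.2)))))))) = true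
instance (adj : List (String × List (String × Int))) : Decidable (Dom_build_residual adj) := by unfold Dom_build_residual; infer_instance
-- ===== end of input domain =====

-- B replaces A's single interleaved mutation of a nested dict by independent passes: a flat
-- edge list and a deduplicated vertex stream are built first, and each vertex's residual row
-- is then computed on its own by one scan of the edge list (objective: alternative).

-- ===== PORT A =====
-- if v not in residual: residual[v] = {}
def pvAVertexStep (residual : PySem.Dict String (PySem.Dict String Int)) (x : String) :
    PySem.Dict String (PySem.Dict String Int) :=
  if residual.contains x then residual else residual.insert x PySem.Dict.empty

-- body of the inner loop 'for v, c in adj[u].items(): …'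
def pvAEdgeStep (u : String) (residual : PySem.Dict String (PySem.Dict String Int))
    (vc : String × Int) : PySem.Dict String (PySem.Dict String Int) :=
  let residual := pvAVertexStep residual vc.1
  -- residual[u][v] = residual[u].get(v, 0) + c
  let residual := residual.modify u PySem.Dict.empty
    (fun inner => inner.insert vc.1 (inner.getD vc.1 0 + vc.2))
  -- residual[v].setdefault(u, residual[v].get(u, 0))
  residual.modify vc.1 PySem.Dict.empty
    (fun inner => inner.setdefault u (inner.getD u 0))

-- body of the outer loop 'for u in adj: …'
def pvAStep (residual : PySem.Dict String (PySem.Dict String Int))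
    (p : String × List (String × Int)) : PySem.Dict String (PySem.Dict String Int) :=
  p.2.foldl (pvAEdgeStep p.1) (pvAVertexStep residual p.1)

def build_residual (adj : List (String × List (String × Int))) : List (String × List (String × Int)) :=
  let residual := adj.foldl pvAStep PySem.Dict.empty
  residual.items.map (fun q => (q.1, q.2.items))

-- ===== PORT B =====
-- one step of _row's loop body: forward edge then reverse default
def pvRowStep (x : String) (row : PySem.Dict String Int) (e : String × String × Int) : PySem.Dict String Int :=
  -- if u == x: row[v] = row.get(v, 0) + c
  let row := if e.1 == x then row.modify e.2.1 0 (· + e.2.2) else row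
  -- if v == x and u not in row: row[u] = 0
  if e.2.1 == x && !(row.contains e.1) then row.insert e.1 0 else row

-- _row(edges, x): one scan of the flat edge list
def pvRow (edges : List (String × String × Int)) (x : String) : PySem.Dict String Int :=
  edges.foldl (pvRowStep x) PySem.Dict.empty

def pvEdges (adj : List (String × List (String × Int))) : List (String × String × Int) :=
  adj.flatMap (fun p => p.2.map (fun vc => (p.1, vc.1, vc.2)))

def pvStream (adj : List (String × List (String × Int))) : List String :=
  adj.flatMap (fun p => p.1 :: p.2.map (·.1))

-- one step of the grouping loop: append edge e to the lists of the (one or two) vertices it touches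
def pvTouchStep (t : PySem.Dict String (List (String × String × Int)))
    (e : String × String × Int) : PySem.Dict String (List (String × String × Int)) :=
  let t := t.modify e.1 [] (· ++ [e])
  if e.2.1 != e.1 then t.modify e.2.1 [] (· ++ [e]) else t

def build_residual_alt (adj : List (String × List (String × Int))) : List (String × List (String × Int)) :=
  let edges := pvEdges adj
  let order := PySem.List.dedup (pvStream adj)
  -- touching = {x: [] for x in order}; then one pass over edges filling the buckets
  let touching := edges.foldl pvTouchStep
    (order.foldl (fun t x => t.insert x []) PySem.Dict.empty)
  order.map (fun x => (x, (pvRow (touching.getD x []) x).items))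

-- ===== PRECONDITION & SPEC =====
def Spec_build_residual (adj : List (String × List (String × Int))) (out : List (String × List (String × Int))) : Prop := out = build_residual_alt adj
instance (adj : List (String × List (String × Int))) (out : List (String × List (String × Int))) : Decidable (Spec_build_residual adj out) := by unfold Spec_build_residual; infer_instance

-- ===== CLAIM (what is proved, stated in full; the proofs are below) =====
def Claim_equal_build_residual : Prop := ∀ (adj : List (String × List (String × Int))), Dom_build_residual adj → Spec_build_residual adj (build_residual adj)

-- ===== LEMMAS AND PROOFS =====

-- a dict whose items are a keyed map over a list of keys
def pvMk (L : List String) (R : String → PySem.Dict String Int) :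
    PySem.Dict String (PySem.Dict String Int) :=
  PySem.Dict.mk (L.map (fun x => (x, R x)))

-- the loop invariant state: rows for the deduplicated vertex stream S, from edge prefix E
def pvState (S : List String) (E : List (String × String × Int)) :
    PySem.Dict String (PySem.Dict String Int) :=
  pvMk (PySem.List.dedup S) (pvRow E)

-- all endpoints of E already occur in S
def pvEndOk (E : List (String × String × Int)) (S : List String) : Prop :=
  ∀ e ∈ E, e.1 ∈ S ∧ e.2.1 ∈ S

theorem pvMk_contains (L : List String) (R : String → PySem.Dict String Int) (u : String) :
    (pvMk L R).contains u = decide (u ∈ L) := by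
  induction L with
  | nil => simp [pvMk, PySem.Dict.contains]
  | cons a t ih =>
      simp only [pvMk, PySem.Dict.contains, List.map_cons, List.any_cons] at ih ⊢
      by_cases h : a = u
      · simp [h]
      · simp [h, Ne.symm h, ih]

theorem pvMk_getD (L : List String) (R : String → PySem.Dict String Int) (u : String)
    (hu : u ∈ L) (d0 : PySem.Dict String Int) : (pvMk L R).getD u d0 = R u := by
  induction L with
  | nil => cases hu
  | cons a t ih =>
      simp only [pvMk, List.map_cons] at *
      rw [PySem.Dict.getD_eq_get?_getD, PySem.Dict.get?_mk_cons]
      by_cases h : a = u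
      · simp [h]
      · have hut : u ∈ t := by
          rcases List.mem_cons.mp hu with h' | h'
          · exact absurd h'.symm h
          · exact h'
        have := ih hut
        rw [PySem.Dict.getD_eq_get?_getD] at this
        simp [h, this]

theorem pvMk_insert (L : List String) (R : String → PySem.Dict String Int) (u : String)
    (hu : u ∈ L) (w : PySem.Dict String Int) :
    (pvMk L R).insert u w = pvMk L (fun x => if x = u then w else R x) := by
  have hc : (pvMk L R).contains u = true := by
    rw [pvMk_contains]; simpa using hu
  apply PySem.Dict.ext
  rw [PySem.Dict.items_insert_of_contains _ _ hc]
  show (List.map (fun x => (x, R x)) L).map _ = _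
  rw [List.map_map]
  apply List.map_congr_left
  intro x _
  by_cases h : x = u
  · simp [h]
  · simp [h]

theorem pvMk_modify (L : List String) (R : String → PySem.Dict String Int) (u : String)
    (hu : u ∈ L) (d0 : PySem.Dict String Int) (f : PySem.Dict String Int → PySem.Dict String Int) :
    (pvMk L R).modify u d0 f = pvMk L (fun x => if x = u then f (R u) else R x) := by
  show (pvMk L R).insert u (f ((pvMk L R).getD u d0)) = _
  rw [pvMk_getD L R u hu d0, pvMk_insert L R u hu]

theorem pv_setdefault_getD_zero (d : PySem.Dict String Int) (u : String) :
    d.setdefault u (d.getD u 0) = if d.contains u then d else d.insert u 0 := by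
  by_cases h : d.contains u = true
  · rw [PySem.Dict.setdefault_of_contains _ _ h]; simp [h]
  · have h' : d.contains u = false := by simpa using h
    rw [PySem.Dict.setdefault_of_not_contains _ _ h',
      PySem.Dict.getD_of_not_contains _ _ h']
    simp [h']

-- vertices never touched by E have an empty row
theorem pvRow_untouched (E : List (String × String × Int)) (x : String)
    (h : ∀ e ∈ E, e.1 ≠ x ∧ e.2.1 ≠ x) : pvRow E x = PySem.Dict.empty := by
  have key : ∀ (row : PySem.Dict String Int), E.foldl (pvRowStep x) row = row := by
    induction E with
    | nil => intro row; rfl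
    | cons e t ih =>
        intro row
        have he := h e (List.mem_cons_self ..)
        have hstep : pvRowStep x row e = row := by
          simp [pvRowStep, he.1, he.2]
        rw [List.foldl_cons, hstep]
        exact ih (fun e' he' => h e' (List.mem_cons_of_mem _ he')) row
  exact key PySem.Dict.empty

theorem pvRow_append (E : List (String × String × Int)) (e : String × String × Int) (x : String) :
    pvRow (E ++ [e]) x = pvRowStep x (pvRow E x) e := by
  simp [pvRow, List.foldl_append]

-- the 'if v not in residual: residual[v] = {}' step on the invariant state
theorem pvAVertexStep_state (S : List String) (E : List (String × String × Int)) (x : String)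
    (hE : pvEndOk E S) : pvAVertexStep (pvState S E) x = pvState (S ++ [x]) E := by
  unfold pvAVertexStep pvState
  rw [pvMk_contains]
  have hded : PySem.List.dedup (S ++ [x]) = PySem.Set.add (PySem.List.dedup S) x :=
    PySem.Set.ofList_append_singleton S x
  by_cases hx : x ∈ S
  · have hmem : x ∈ PySem.List.dedup S := (PySem.Set.mem_ofList S x).mpr hx
    rw [hded, PySem.Set.add_of_mem hmem, if_pos (by simpa using hmem)]
  · have hmem : x ∉ PySem.List.dedup S := fun h => hx ((PySem.Set.mem_ofList S x).mp h)
    have hc : (pvMk (PySem.List.dedup S) (pvRow E)).contains x = false := by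
      rw [pvMk_contains]; simpa using hmem
    rw [hded, PySem.Set.add_of_not_mem hmem, if_neg (by simpa using hmem)]
    apply PySem.Dict.ext
    rw [PySem.Dict.items_insert_of_not_contains _ _ hc]
    have hrow : pvRow E x = PySem.Dict.empty := by
      apply pvRow_untouched
      intro e he
      rcases hE e he with ⟨h1, h2⟩
      exact ⟨fun h => hx (h ▸ h1), fun h => hx (h ▸ h2)⟩
    show (List.map (fun y => (y, pvRow E y)) (PySem.List.dedup S)) ++ _ = _
    simp [pvMk, hrow]

-- the two dict mutations for one edge, on the invariant state
theorem pvEdge_mutations (L : List String) (R : String → PySem.Dict String Int)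
    (u v : String) (c : Int) (hu : u ∈ L) (hv : v ∈ L) :
    ((pvMk L R).modify u PySem.Dict.empty
        (fun inner => inner.insert v (inner.getD v 0 + c))).modify v PySem.Dict.empty
        (fun inner => inner.setdefault u (inner.getD u 0))
      = pvMk L (fun x => pvRowStep x (R x) (u, v, c)) := by
  rw [pvMk_modify L R u hu, pvMk_modify _ _ v hv]
  congr 1
  funext x
  simp only [pvRowStep]
  by_cases hxu : x = u <;> by_cases hxv : x = v
  · subst hxu; subst hxv
    rw [if_pos rfl, if_pos rfl, pv_setdefault_getD_zero]
    simp [pysem, PySem.Dict.modify]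
  · subst hxu
    rw [if_neg hxv, if_pos rfl]
    simp [pysem, PySem.Dict.modify, Ne.symm hxv, hxv]
  · subst hxv
    rw [if_pos rfl, pv_setdefault_getD_zero]
    simp only [if_neg hxu]
    simp [pysem, Ne.symm hxu]
  · rw [if_neg hxv, if_neg hxu]
    simp [pysem, Ne.symm hxu, Ne.symm hxv]

theorem pvAEdgeStep_state (S : List String) (E : List (String × String × Int))
    (u : String) (vc : String × Int) (hu : u ∈ S) (hE : pvEndOk E S) :
    pvAEdgeStep u (pvState S E) vc = pvState (S ++ [vc.1]) (E ++ [(u, vc.1, vc.2)]) := by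
  show ((pvAVertexStep (pvState S E) vc.1).modify u PySem.Dict.empty
      (fun inner => inner.insert vc.1 (inner.getD vc.1 0 + vc.2))).modify vc.1 PySem.Dict.empty
      (fun inner => inner.setdefault u (inner.getD u 0)) = _
  rw [pvAVertexStep_state S E vc.1 hE]
  unfold pvState
  rw [pvEdge_mutations _ _ u vc.1 vc.2
    (by rw [show PySem.List.dedup (S ++ [vc.1]) = PySem.Set.ofList (S ++ [vc.1]) from rfl, PySem.Set.mem_ofList]; exact List.mem_append_left _ hu)
    (by rw [show PySem.List.dedup (S ++ [vc.1]) = PySem.Set.ofList (S ++ [vc.1]) from rfl, PySem.Set.mem_ofList]; exact List.mem_append_right _ (List.mem_singleton.mpr rfl))]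
  congr 1
  funext x
  rw [pvRow_append]

theorem pv_inner_loop (u : String) (pairs : List (String × Int)) :
    ∀ (S : List String) (E : List (String × String × Int)), u ∈ S → pvEndOk E S →
      pairs.foldl (pvAEdgeStep u) (pvState S E)
        = pvState (S ++ pairs.map (·.1)) (E ++ pairs.map (fun vc => (u, vc.1, vc.2))) := by
  induction pairs with
  | nil => intro S E _ _; simp
  | cons vc t ih =>
      intro S E hu hE
      rw [List.foldl_cons, pvAEdgeStep_state S E u vc hu hE]
      rw [ih (S ++ [vc.1]) (E ++ [(u, vc.1, vc.2)]) (List.mem_append_left _ hu) ?hE']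
      · simp
      case hE' =>
        intro e he
        rcases List.mem_append.mp he with h | h
        · rcases hE e h with ⟨h1, h2⟩
          exact ⟨List.mem_append_left _ h1, List.mem_append_left _ h2⟩
        · rcases List.mem_singleton.mp h with rfl
          exact ⟨List.mem_append_left _ hu,
            List.mem_append_right _ (List.mem_singleton.mpr rfl)⟩

theorem pv_outer_loop (adj : List (String × List (String × Int))) :
    ∀ (S : List String) (E : List (String × String × Int)), pvEndOk E S →
      adj.foldl pvAStep (pvState S E) = pvState (S ++ pvStream adj) (E ++ pvEdges adj) := by
  induction adj with
  | nil => intro S E _; simp [pvStream, pvEdges]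
  | cons p t ih =>
      intro S E hE
      rw [List.foldl_cons]
      show t.foldl pvAStep (p.2.foldl (pvAEdgeStep p.1) (pvAVertexStep (pvState S E) p.1)) = _
      rw [pvAVertexStep_state S E p.1 hE]
      rw [pv_inner_loop p.1 p.2 (S ++ [p.1]) E (List.mem_append_right _ (List.mem_singleton.mpr rfl))
        (fun e he => ⟨List.mem_append_left _ (hE e he).1, List.mem_append_left _ (hE e he).2⟩)]
      rw [ih _ _ ?hE']
      · simp [pvStream, pvEdges]
      case hE' =>
        intro e he
        rcases List.mem_append.mp he with h | h
        · rcases hE e h with ⟨h1, h2⟩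
          exact ⟨List.mem_append_left _ (List.mem_append_left _ h1),
            List.mem_append_left _ (List.mem_append_left _ h2)⟩
        · rcases List.mem_map.mp h with ⟨vc, hvc, rfl⟩
          exact ⟨List.mem_append_left _ (List.mem_append_right _ (List.mem_singleton.mpr rfl)),
            List.mem_append_right _ (List.mem_map_of_mem hvc)⟩

-- the initial all-empty buckets look up to []
theorem pvTouch_init_getD (L : List String) :
    ∀ (d : PySem.Dict String (List (String × String × Int))), (∀ k, d.getD k [] = []) →
      ∀ (x : String), (L.foldl (fun t y => t.insert y []) d).getD x [] = [] := by
  induction L with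
  | nil => intro d hd x; exact hd x
  | cons a t ih =>
      intro d hd x
      rw [List.foldl_cons]
      refine ih _ (fun k => ?_) x
      rw [PySem.Dict.getD_insert]
      split
      · rfl
      · exact hd k

-- the grouping pass puts into bucket x exactly the edges touching x, in order
theorem pvTouch_getD (edges : List (String × String × Int)) :
    ∀ (d : PySem.Dict String (List (String × String × Int))) (x : String),
      (edges.foldl pvTouchStep d).getD x []
        = d.getD x [] ++ edges.filter (fun e => e.1 == x || e.2.1 == x) := by
  induction edges with
  | nil => intro d x; simp
  | cons e t ih =>
      intro d x
      rw [List.foldl_cons, ih]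
      have hstep : (pvTouchStep d e).getD x []
          = d.getD x [] ++ (if (e.1 == x || e.2.1 == x) then [e] else []) := by
        unfold pvTouchStep
        by_cases hself : e.2.1 = e.1
        · rw [if_neg (by simp [hself]), PySem.Dict.getD_modify]
          by_cases h1 : x = e.1
          · simp [h1, hself]
          · simp [h1, hself, Ne.symm h1]
        · rw [if_pos (by simp [hself]), PySem.Dict.getD_modify, PySem.Dict.getD_modify]
          by_cases h1 : x = e.1 <;> by_cases h2 : x = e.2.1
          · exact absurd (h2.symm.trans h1) hself
          · simp only [h1, hself]
            simp [Ne.symm hself]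
          · simp [h2, hself]
          · simp [h1, h2, Ne.symm h1, Ne.symm h2, PySem.Dict.getD_modify]
      rw [hstep]
      by_cases hc : (e.1 == x || e.2.1 == x) = true <;>
        simp [hc]

-- replaying only the touching edges gives the same row as replaying all edges
theorem pvRow_filter (edges : List (String × String × Int)) (x : String) :
    pvRow (edges.filter (fun e => e.1 == x || e.2.1 == x)) x = pvRow edges x := by
  suffices h : ∀ row, (edges.filter (fun e => e.1 == x || e.2.1 == x)).foldl (pvRowStep x) row
      = edges.foldl (pvRowStep x) row from h _
  induction edges with
  | nil => intro row; rfl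
  | cons e t ih =>
      intro row
      rw [List.filter_cons]
      by_cases hc : (e.1 == x || e.2.1 == x) = true
      · rw [if_pos hc, List.foldl_cons, List.foldl_cons]
        exact ih _
      · have hc' : e.1 ≠ x ∧ e.2.1 ≠ x := by simpa using hc
        have hid : pvRowStep x row e = row := by
          simp [pvRowStep, hc'.1, hc'.2]
        rw [if_neg hc, List.foldl_cons, hid]
        exact ih row

-- ===== VERDICT (by name: the statement is the Claim_ definition above) =====
theorem build_residual_spec : Claim_equal_build_residual := by
  intro adj _
  unfold Spec_build_residual build_residual build_residual_alt
  have h0 : (PySem.Dict.empty : PySem.Dict String (PySem.Dict String Int)) = pvState [] [] := by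
    rfl
  have h := pv_outer_loop adj [] [] (by intro e he; cases he)
  simp only [h0, h, List.nil_append]
  unfold pvState pvMk
  show (List.map (fun x => (x, pvRow (pvEdges adj) x)) _).map _ = _
  rw [List.map_map]
  apply List.map_congr_left
  intro x _
  rw [pvTouch_getD, pvTouch_init_getD _ _ (fun k => by simp [pysem]) x,
    List.nil_append, pvRow_filter]
  rfl
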